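-- pv_equiv track=rewrite | github.com/tnieuwe/bioinformatics_active_learning_approach | chapter_1/1_2_coding exercises/coding_exercise_1_2_2.py | DictFrequentWords
-- ===== SOURCE A (Python) =====
-- def DictFrequentWords(text, k):
--     text_length = len(text)
--     window_length = text_length - k
--     kmer_dict = dict()
--     ## Need to add + 1 to the range to include the last value for some reason?
--     for ind in range(0, window_length + 1):
--         cur_string =  text[ind:ind + k]
--         if cur_string in kmer_dict.keys():
--             kmer_dict[cur_string] = kmer_dict[cur_string] + 1
--         else:
--             kmer_dict[cur_string] = 1
--     max_hit = max(kmer_dict.values())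
--     final_dict = {key: value for key, value in kmer_dict.items() if value == max_hit}
--     return(final_dict)
-- ===== SOURCE B (Python) =====
-- def DictFrequentWords(text, k):
--     kmers = [text[i:i + k] for i in range(len(text) - k + 1)]
--     distinct = list(dict.fromkeys(kmers))
--     counts = [kmers.count(s) for s in distinct]
--     max_hit = max(counts)
--     return {s: c for s, c in zip(distinct, counts) if c == max_hit}
-- ===== Notes on version B (the rewrite author's own statement) =====
-- stated objective: alternative
-- what changed: Replaces the incremental hash-map counting loop (membership test + per-window dict update, then max over dict values and a dict-comprehension filter) by a list pipeline: materialise all k-mers, dedup them in first-occurrence order, count each distinct k-mer with list.count, and keep the pairs reaching the maximum count.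
import Mathlib
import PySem

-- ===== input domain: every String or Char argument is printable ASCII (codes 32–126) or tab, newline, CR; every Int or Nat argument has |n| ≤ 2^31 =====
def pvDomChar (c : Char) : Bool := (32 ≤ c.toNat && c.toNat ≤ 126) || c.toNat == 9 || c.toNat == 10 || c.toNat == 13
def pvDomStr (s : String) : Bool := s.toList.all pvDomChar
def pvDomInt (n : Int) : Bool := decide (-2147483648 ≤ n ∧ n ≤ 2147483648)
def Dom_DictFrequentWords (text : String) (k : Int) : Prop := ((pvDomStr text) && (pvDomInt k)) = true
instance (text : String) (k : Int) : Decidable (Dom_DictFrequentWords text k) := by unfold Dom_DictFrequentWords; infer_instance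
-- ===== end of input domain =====

-- B replaces A's incremental hash-map counting by a list pipeline (all k-mers, ordered
-- dedup, per-distinct count, filter by the maximum); alternative decomposition, no speed claim.

-- ===== PORT A =====
def DictFrequentWords (text : String) (k : Int) : List (String × Int) :=
  let textLength : Int := PySem.Str.len text
  let windowLength : Int := textLength - k
  let kmerDict : PySem.Dict String Int :=
    (PySem.List.pyRange 0 (windowLength + 1) 1).foldl
      (fun d ind =>
        let curString := PySem.Str.slice text (some ind) (some (ind + k))
        if d.contains curString then
          d.insert curString (d.getD curString 0 + 1)   -- kmer_dict[cur] = kmer_dict[cur] + 1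
        else
          d.insert curString 1)
      PySem.Dict.empty
  match PySem.List.max? kmerDict.values (fun v => v) with            -- max() raises on empty: outside Pre_
  | none => []
  | some maxHit => kmerDict.items.filter (fun kv => kv.2 == maxHit)

-- ===== PORT B =====
def DictFrequentWords_alt (text : String) (k : Int) : List (String × Int) :=
  let kmers : List String :=
    (PySem.List.pyRange 0 (PySem.Str.len text - k + 1) 1).map
      (fun i => PySem.Str.slice text (some i) (some (i + k)))
  let distinct : List String := PySem.List.dedup kmers  -- list(dict.fromkeys(kmers))
  let counts : List Int := distinct.map (fun s => (kmers.count s : Int))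
  match PySem.List.max? counts (fun v => v) with                     -- max() raises on empty: outside Pre_
  | none => []
  | some maxHit => (distinct.zip counts).filter (fun p => p.2 == maxHit)

-- ===== PRECONDITION & SPEC =====
-- Pre_ excludes exactly k > len(text): there are no windows, the k-mer dict is empty and
-- Python's max() raises ValueError in A (and in B).
def Pre_DictFrequentWords (text : String) (k : Int) : Prop := k ≤ (text.length : Int)
instance (text : String) (k : Int) : Decidable (Pre_DictFrequentWords text k) := by
  unfold Pre_DictFrequentWords; infer_instance

def pvWitness_DictFrequentWords : String × Int := ("ACGTACG", 2)

def Spec_DictFrequentWords (text : String) (k : Int) (out : List (String × Int)) : Prop :=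
  out = DictFrequentWords_alt text k
instance (text : String) (k : Int) (out : List (String × Int)) :
    Decidable (Spec_DictFrequentWords text k out) := by
  unfold Spec_DictFrequentWords; infer_instance

-- ===== CLAIM (what is proved, stated in full; the proofs are below) =====
def Claim_equal_DictFrequentWords : Prop :=
  ∀ (text : String) (k : Int), Dom_DictFrequentWords text k →
    Pre_DictFrequentWords text k →
    Spec_DictFrequentWords text k (DictFrequentWords text k)

-- ===== LEMMAS AND PROOFS =====

-- A's counting loop over the window indices builds exactly Counter(kmers):
-- when a key is absent its stored count is 0, so both branches are the counter step.
theorem pv_fold_eq (text : String) (k : Int) (n : Int) :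
    (PySem.List.pyRange 0 n 1).foldl
      (fun d ind =>
        if d.contains (PySem.Str.slice text (some ind) (some (ind + k))) then
          d.insert (PySem.Str.slice text (some ind) (some (ind + k)))
            (d.getD (PySem.Str.slice text (some ind) (some (ind + k))) 0 + 1)
        else d.insert (PySem.Str.slice text (some ind) (some (ind + k))) 1)
      PySem.Dict.empty
    = PySem.Dict.counter ((PySem.List.pyRange 0 n 1).map
        (fun i => PySem.Str.slice text (some i) (some (i + k)))) := by
  rw [← PySem.Dict.foldl_insert_getD_add_one_eq_counter, List.foldl_map]
  congr 1
  funext d ind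
  by_cases h : d.contains (PySem.Str.slice text (some ind) (some (ind + k))) = true
  · simp [h]
  · simp [eq_false_of_ne_true h,
      PySem.Dict.getD_of_not_contains d 0 (eq_false_of_ne_true h)]

theorem pv_ports_eq (text : String) (k : Int) :
    DictFrequentWords text k = DictFrequentWords_alt text k := by
  unfold DictFrequentWords DictFrequentWords_alt
  dsimp only
  rw [pv_fold_eq, PySem.List.dedup_eq_ofList]
  set L := (PySem.List.pyRange 0 (PySem.Str.len text - k + 1) 1).map
      (fun i => PySem.Str.slice text (some i) (some (i + k))) with hL
  have hitems : (PySem.Dict.counter L).items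
      = (PySem.Set.ofList L).map (fun s => (s, (L.count s : Int))) :=
    PySem.Dict.items_counter L
  have hvals : (PySem.Dict.counter L).values
      = (PySem.Set.ofList L).map (fun s => (L.count s : Int)) := by
    show ((PySem.Dict.counter L).items).map (·.2) = _
    rw [hitems, List.map_map]
    rfl
  have hzip : (PySem.Set.ofList L).zip ((PySem.Set.ofList L).map (fun s => (L.count s : Int)))
      = (PySem.Set.ofList L).map (fun s => (s, (L.count s : Int))) := by
    calc (PySem.Set.ofList L).zip ((PySem.Set.ofList L).map (fun s => (L.count s : Int)))
        = ((PySem.Set.ofList L).map id).zip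
            ((PySem.Set.ofList L).map (fun s => (L.count s : Int))) := by rw [List.map_id]
      _ = (PySem.Set.ofList L).map (fun s => (id s, (L.count s : Int))) := by rw [List.zip_map']
      _ = (PySem.Set.ofList L).map (fun s => (s, (L.count s : Int))) := rfl
  rw [hvals, hitems, hzip]

-- ===== VERDICT (by name: the statement is the Claim_ definition above) =====
theorem DictFrequentWords_spec : Claim_equal_DictFrequentWords := by
  intro text k _ _
  unfold Spec_DictFrequentWords
  exact pv_ports_eq text k
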